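-- pv_equiv track=rewrite | github.com/kimnagyeong99/Coding_Test | 프로그래머스/0/120869. 외계어 사전/외계어 사전.py | solution
-- ===== SOURCE A (Python) =====
-- def solution(spell, dic):
--     for i in dic:
--         i = list(i)
--         if len(i) == len(spell):
--             for j in spell:
--                 if j in i:
--                     i.remove(j)
--             if len(i) == 0:
--                 return 1
--                 break
--
--     return 2
-- ===== SOURCE B (Python) =====
-- def solution(spell, dic):
--     key = sorted(spell)
--     return 1 if any(sorted(w) == key for w in dic) else 2
-- ===== Notes on version B (the rewrite author's own statement) =====
-- stated objective: simpler
-- what changed: Replaces A's per-word length check plus membership-and-remove inner loop with a single canonical-form test: sort spell once and compare each word's sorted character list against it.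
import Mathlib
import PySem

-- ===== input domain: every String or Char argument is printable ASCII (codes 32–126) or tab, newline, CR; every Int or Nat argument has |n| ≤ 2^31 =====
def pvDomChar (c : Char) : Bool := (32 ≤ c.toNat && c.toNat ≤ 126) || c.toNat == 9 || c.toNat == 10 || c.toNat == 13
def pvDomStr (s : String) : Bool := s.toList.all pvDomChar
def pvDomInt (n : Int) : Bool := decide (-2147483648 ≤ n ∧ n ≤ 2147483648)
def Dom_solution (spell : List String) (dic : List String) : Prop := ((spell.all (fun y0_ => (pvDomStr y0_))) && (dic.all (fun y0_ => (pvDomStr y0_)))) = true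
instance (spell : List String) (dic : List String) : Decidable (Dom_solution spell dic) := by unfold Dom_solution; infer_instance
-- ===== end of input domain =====

-- B replaces A's per-word membership-and-remove loop by a single sorted-key comparison (objective: simpler).

-- ===== PORT A =====
-- inner loop 'for j in spell: if j in i: i.remove(j)' (remove = erase first occurrence)
def solutionRemove (spell : List String) (i : List String) : List String :=
  spell.foldl (fun i j => if j ∈ i then (PySem.List.remove? i j).getD i else i) i

-- outer loop 'for i in dic: …' with its early return
def solutionGo (spell : List String) : List String → Int
  | [] => 2
  | w :: rest =>
    let i := w.toList.map (fun c => String.ofList [c])  -- list(i): chars as 1-char strings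
    if i.length = spell.length then
      if (solutionRemove spell i).length = 0 then 1 else solutionGo spell rest
    else solutionGo spell rest

def solution (spell : List String) (dic : List String) : Int :=
  solutionGo spell dic

-- ===== PORT B =====
def solution_alt (spell : List String) (dic : List String) : Int :=
  let key := PySem.List.sorted spell (fun x => x) false
  if dic.any (fun w =>
      PySem.List.sorted (w.toList.map (fun c => String.ofList [c])) (fun x => x) false == key)
  then 1 else 2

-- ===== PRECONDITION & SPEC =====
def Spec_solution (spell : List String) (dic : List String) (out : Int) : Prop := out = solution_alt spell dic
instance (spell : List String) (dic : List String) (out : Int) : Decidable (Spec_solution spell dic out) := by unfold Spec_solution; infer_instance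

-- ===== CLAIM (what is proved, stated in full; the proofs are below) =====
def Claim_equal_solution : Prop := ∀ (spell : List String) (dic : List String), Dom_solution spell dic → Spec_solution spell dic (solution spell dic)

-- ===== LEMMAS AND PROOFS =====

-- the remove loop shortens the list by at most one per spell element
theorem solutionRemove_length_ge (spell : List String) (l : List String) :
    l.length ≤ (solutionRemove spell l).length + spell.length := by
  induction spell generalizing l with
  | nil => simp [solutionRemove]
  | cons j rest ih =>
    unfold solutionRemove
    simp only [List.foldl_cons]
    by_cases h : j ∈ l
    · rw [if_pos h, PySem.List.remove?_eq_some_erase l j h]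
      simp only [Option.getD_some]
      have := ih (l.erase j)
      have hl := List.length_erase_of_mem h
      simp only [solutionRemove] at this
      simp only [List.length_cons]
      omega
    · rw [if_neg h]
      have := ih l
      simp only [solutionRemove] at this
      simp only [List.length_cons]
      omega

-- with equal lengths, the remove loop empties the word iff spell is a permutation of it
theorem solutionRemove_empty_iff (spell : List String) (l : List String)
    (h : l.length = spell.length) :
    (solutionRemove spell l = [] ↔ spell.Perm l) := by
  induction spell generalizing l with
  | nil =>
    have : l = [] := List.length_eq_zero_iff.mp h
    subst this
    simp [solutionRemove]
  | cons j rest ih =>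
    unfold solutionRemove
    simp only [List.foldl_cons]
    by_cases hj : j ∈ l
    · rw [if_pos hj, PySem.List.remove?_eq_some_erase l j hj]
      simp only [Option.getD_some]
      have hl : (l.erase j).length = rest.length := by
        have := List.length_erase_of_mem hj
        simp only [List.length_cons] at h
        omega
      rw [show (rest.foldl (fun i j => if j ∈ i then (PySem.List.remove? i j).getD i else i) (l.erase j)) = solutionRemove rest (l.erase j) from rfl,
        ih (l.erase j) hl, List.cons_perm_iff_perm_erase]
      exact (and_iff_right hj).symm
    · rw [if_neg hj]
      constructor
      · intro hempty
        exfalso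
        have := solutionRemove_length_ge rest l
        unfold solutionRemove at this
        rw [hempty] at this
        simp only [List.length_nil, List.length_cons] at this h
        omega
      · intro hperm
        exact absurd (hperm.mem_iff.mp (List.mem_cons_self)) hj

theorem solution_go_eq (spell : List String) (dic : List String) :
    solutionGo spell dic = solution_alt spell dic := by
  induction dic with
  | nil => simp [solutionGo, solution_alt]
  | cons w rest ih =>
    unfold solutionGo
    simp only []
    set i := w.toList.map (fun c => String.ofList [c]) with hi
    have hkey : (PySem.List.sorted (w.toList.map (fun c => String.ofList [c])) (fun x => x) false ==
        PySem.List.sorted spell (fun x => x) false) = true ↔ i.Perm spell := by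
      rw [beq_iff_eq]
      exact PySem.List.sorted_id_eq_sorted_id_iff_perm i spell
    by_cases hlen : i.length = spell.length
    · rw [if_pos hlen]
      by_cases hemp : (solutionRemove spell i).length = 0
      · rw [if_pos hemp]
        have hperm : spell.Perm i :=
          (solutionRemove_empty_iff spell i hlen).mp (List.length_eq_zero_iff.mp hemp)
        simp only [solution_alt, List.any_cons]
        have : (PySem.List.sorted (w.toList.map (fun c => String.ofList [c])) (fun x => x) false ==
            PySem.List.sorted spell (fun x => x) false) = true := hkey.mpr hperm.symm
        simp [this]
      · rw [if_neg hemp, ih]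
        have hnoperm : ¬ i.Perm spell := by
          intro hp
          exact hemp (by
            rw [List.length_eq_zero_iff]
            exact (solutionRemove_empty_iff spell i hlen).mpr hp.symm)
        simp only [solution_alt, List.any_cons]
        have : (PySem.List.sorted (w.toList.map (fun c => String.ofList [c])) (fun x => x) false ==
            PySem.List.sorted spell (fun x => x) false) = false := by
          rw [Bool.eq_false_iff]
          intro hc; exact hnoperm (hkey.mp hc)
        simp [this]
    · rw [if_neg hlen, ih]
      have hnoperm : ¬ i.Perm spell := fun hp => hlen hp.length_eq
      simp only [solution_alt, List.any_cons]
      have : (PySem.List.sorted (w.toList.map (fun c => String.ofList [c])) (fun x => x) false ==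
          PySem.List.sorted spell (fun x => x) false) = false := by
        rw [Bool.eq_false_iff]
        intro hc; exact hnoperm (hkey.mp hc)
      simp [this]

-- ===== VERDICT (by name: the statement is the Claim_ definition above) =====
theorem solution_spec : Claim_equal_solution := by
  intro spell dic _
  unfold Spec_solution solution
  exact solution_go_eq spell dic
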